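-- pv_equiv track=rewrite | github.com/eldari77/nOVALi | novali-v7_rc00-standalone/operator_shell/external_adapter/read_only/review_integration.py | _severity_for
-- ===== SOURCE A (Python) =====
-- WARNING_TRIGGERS = {"read_only_stale_snapshot"}
--
-- HIGH_TRIGGERS = {
--     "read_only_schema_missing_field",
--     "read_only_schema_invalid",
--     "read_only_conflicting_observation",
--     "read_only_wrong_lane_attribution",
--     "read_only_replay_missing",
--     "read_only_rollback_ambiguity",
--     "read_only_source_unavailable",
--     "read_only_integrity_failed",
-- }
--
-- CRITICAL_TRIGGERS = {
--     "read_only_mutation_requested",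
--     "read_only_forbidden_domain_term",
--     "read_only_secret_detected",
--     "external_mutation_requested",
--     "external_command_requested",
-- }
--
-- def _severity_for(review_reasons: list[str]) -> str:
--     if any(reason in CRITICAL_TRIGGERS for reason in review_reasons):
--         return "critical"
--     if any(reason in HIGH_TRIGGERS for reason in review_reasons):
--         return "high"
--     if any(reason in WARNING_TRIGGERS for reason in review_reasons):
--         return "warning"
--     return "warning" if review_reasons else "info"
-- ===== SOURCE B (Python) =====
-- WARNING_TRIGGERS = {"read_only_stale_snapshot"}
--
-- HIGH_TRIGGERS = {
--     "read_only_schema_missing_field",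
--     "read_only_schema_invalid",
--     "read_only_conflicting_observation",
--     "read_only_wrong_lane_attribution",
--     "read_only_replay_missing",
--     "read_only_rollback_ambiguity",
--     "read_only_source_unavailable",
--     "read_only_integrity_failed",
-- }
--
-- CRITICAL_TRIGGERS = {
--     "read_only_mutation_requested",
--     "read_only_forbidden_domain_term",
--     "read_only_secret_detected",
--     "external_mutation_requested",
--     "external_command_requested",
-- }
--
-- # one rank table built once from the three trigger sets
-- _RANK = {
--     **{t: 1 for t in WARNING_TRIGGERS},
--     **{t: 2 for t in HIGH_TRIGGERS},
--     **{t: 3 for t in CRITICAL_TRIGGERS},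
-- }
--
--
-- def _severity_for(review_reasons: list[str]) -> str:
--     best = 0
--     for reason in review_reasons:
--         best = max(best, _RANK.get(reason, 0))
--     if best == 3:
--         return "critical"
--     if best == 2:
--         return "high"
--     if best == 1:
--         return "warning"
--     return "warning" if review_reasons else "info"
-- ===== Notes on version B (the rewrite author's own statement) =====
-- stated objective: simpler
-- what changed: Replaced three ordered any()-scans over the list (one per trigger set) by a single rank dict built once from the three sets and one pass over the list tracking the maximum rank, mapped back to a severity name at the end.
import Mathlib
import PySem

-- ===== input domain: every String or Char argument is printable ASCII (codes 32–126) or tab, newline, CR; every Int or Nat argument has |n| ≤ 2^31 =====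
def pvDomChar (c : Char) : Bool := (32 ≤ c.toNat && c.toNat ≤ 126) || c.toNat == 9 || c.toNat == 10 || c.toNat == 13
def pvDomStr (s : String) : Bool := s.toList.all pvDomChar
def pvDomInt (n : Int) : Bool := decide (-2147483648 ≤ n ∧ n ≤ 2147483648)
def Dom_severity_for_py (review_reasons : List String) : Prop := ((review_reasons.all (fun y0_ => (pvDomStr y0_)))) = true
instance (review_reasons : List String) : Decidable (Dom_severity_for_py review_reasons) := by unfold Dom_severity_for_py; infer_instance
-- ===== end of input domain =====

-- B replaces A's three ordered any()-scans by one rank table built once from the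
-- three trigger sets and a single pass tracking the maximum rank (objective: simpler).

-- ===== PORT A =====
def WARNING_TRIGGERS : PySem.Set String := ["read_only_stale_snapshot"]

def HIGH_TRIGGERS : PySem.Set String :=
  ["read_only_schema_missing_field",
   "read_only_schema_invalid",
   "read_only_conflicting_observation",
   "read_only_wrong_lane_attribution",
   "read_only_replay_missing",
   "read_only_rollback_ambiguity",
   "read_only_source_unavailable",
   "read_only_integrity_failed"]

def CRITICAL_TRIGGERS : PySem.Set String :=
  ["read_only_mutation_requested",
   "read_only_forbidden_domain_term",
   "read_only_secret_detected",
   "external_mutation_requested",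
   "external_command_requested"]

def severity_for_py (review_reasons : List String) : String :=
  if review_reasons.any (fun reason => CRITICAL_TRIGGERS.contains reason) then "critical"
  else if review_reasons.any (fun reason => HIGH_TRIGGERS.contains reason) then "high"
  else if review_reasons.any (fun reason => WARNING_TRIGGERS.contains reason) then "warning"
  else if !review_reasons.isEmpty then "warning" else "info"

-- ===== PORT B =====
-- _RANK = {**{t:1 for t in WARNING_TRIGGERS}, **{t:2 for t in HIGH_TRIGGERS}, **{t:3 for t in CRITICAL_TRIGGERS}}
def RANK : PySem.Dict String Int :=
  PySem.Dict.ofList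
    (WARNING_TRIGGERS.map (fun t => (t, (1 : Int)))
      ++ HIGH_TRIGGERS.map (fun t => (t, (2 : Int)))
      ++ CRITICAL_TRIGGERS.map (fun t => (t, (3 : Int))))

def severity_for_py_alt (review_reasons : List String) : String :=
  let best := review_reasons.foldl (fun b reason => max b (PySem.Dict.getD RANK reason 0)) 0
  if best = 3 then "critical"
  else if best = 2 then "high"
  else if best = 1 then "warning"
  else if !review_reasons.isEmpty then "warning" else "info"

-- ===== PRECONDITION & SPEC =====
def Spec_severity_for_py (review_reasons : List String) (out : String) : Prop := out = severity_for_py_alt review_reasons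
instance (review_reasons : List String) (out : String) : Decidable (Spec_severity_for_py review_reasons out) := by unfold Spec_severity_for_py; infer_instance

-- ===== CLAIM (what is proved, stated in full; the proofs are below) =====
def Claim_equal_severity_for_py : Prop := ∀ (review_reasons : List String), Dom_severity_for_py review_reasons → Spec_severity_for_py review_reasons (severity_for_py review_reasons)

-- ===== LEMMAS AND PROOFS =====

lemma rank_eq (r : String) : PySem.Dict.getD RANK r 0 =
    (if CRITICAL_TRIGGERS.contains r then 3
     else if HIGH_TRIGGERS.contains r then 2
     else if WARNING_TRIGGERS.contains r then 1 else 0) := by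
  by_cases h3 : CRITICAL_TRIGGERS.contains r = true
  · rw [if_pos h3]
    simp [CRITICAL_TRIGGERS] at h3
    rcases h3 with h|h|h|h|h <;> subst h <;> decide
  · rw [if_neg h3]
    by_cases h2 : HIGH_TRIGGERS.contains r = true
    · rw [if_pos h2]
      simp [HIGH_TRIGGERS] at h2
      rcases h2 with h|h|h|h|h|h|h|h <;> subst h <;> decide
    · rw [if_neg h2]
      by_cases h1 : WARNING_TRIGGERS.contains r = true
      · rw [if_pos h1]
        simp [WARNING_TRIGGERS] at h1
        subst h1; decide
      · rw [if_neg h1]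
        simp [CRITICAL_TRIGGERS, HIGH_TRIGGERS, WARNING_TRIGGERS] at h3 h2 h1
        push Not at h3 h2 h1
        obtain ⟨c1, c2, c3, c4, c5⟩ := h3
        obtain ⟨g1, g2, g3, g4, g5, g6, g7, g8⟩ := h2
        rw [show RANK = PySem.Dict.mk
          [("read_only_stale_snapshot", 1),
           ("read_only_schema_missing_field", 2),
           ("read_only_schema_invalid", 2),
           ("read_only_conflicting_observation", 2),
           ("read_only_wrong_lane_attribution", 2),
           ("read_only_replay_missing", 2),
           ("read_only_rollback_ambiguity", 2),
           ("read_only_source_unavailable", 2),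
           ("read_only_integrity_failed", 2),
           ("read_only_mutation_requested", 3),
           ("read_only_forbidden_domain_term", 3),
           ("read_only_secret_detected", 3),
           ("external_mutation_requested", 3),
           ("external_command_requested", 3)] from rfl]
        simp [PySem.Dict.getD, PySem.Dict.get?,
          Ne.symm c1, Ne.symm c2, Ne.symm c3, Ne.symm c4, Ne.symm c5,
          Ne.symm g1, Ne.symm g2, Ne.symm g3, Ne.symm g4, Ne.symm g5,
          Ne.symm g6, Ne.symm g7, Ne.symm g8, Ne.symm h1]

lemma fold_max_acc (g : String → Int) : ∀ (rs : List String) (b : Int), 0 ≤ b →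
    rs.foldl (fun x r => max x (g r)) b = max b (rs.foldl (fun x r => max x (g r)) 0) := by
  intro rs
  induction rs with
  | nil => intro b hb; simp; omega
  | cons r rs ih =>
    intro b hb
    simp only [List.foldl_cons]
    rw [ih (max b (g r)) (by omega), ih (max 0 (g r)) (by omega)]
    omega

lemma best_eq (rs : List String) :
    rs.foldl (fun b reason => max b (PySem.Dict.getD RANK reason 0)) 0 =
    (if rs.any (fun r => CRITICAL_TRIGGERS.contains r) then 3
     else if rs.any (fun r => HIGH_TRIGGERS.contains r) then 2
     else if rs.any (fun r => WARNING_TRIGGERS.contains r) then 1 else 0) := by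
  induction rs with
  | nil => simp
  | cons r rs ih =>
    simp only [List.foldl_cons, List.any_cons]
    rw [fold_max_acc (fun reason => PySem.Dict.getD RANK reason 0) rs _ (by omega), ih, rank_eq]
    simp only [Bool.or_eq_true, List.any_eq_true, List.contains_eq_mem, decide_eq_true_eq,
      PySem.Set.contains]
    by_cases hc : r ∈ CRITICAL_TRIGGERS <;>
    by_cases hh : r ∈ HIGH_TRIGGERS <;>
    by_cases hw : r ∈ WARNING_TRIGGERS <;>
    by_cases hC : ∃ x ∈ rs, x ∈ CRITICAL_TRIGGERS <;>
    by_cases hH : ∃ x ∈ rs, x ∈ HIGH_TRIGGERS <;>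
    by_cases hW : ∃ x ∈ rs, x ∈ WARNING_TRIGGERS <;>
      simp [hc, hh, hw, hC, hH, hW]

-- ===== VERDICT (by name: the statement is the Claim_ definition above) =====
theorem severity_for_py_spec : Claim_equal_severity_for_py := by
  intro rs _
  unfold Spec_severity_for_py severity_for_py severity_for_py_alt
  rw [best_eq]
  by_cases hC : ∃ x ∈ rs, x ∈ CRITICAL_TRIGGERS <;>
  by_cases hH : ∃ x ∈ rs, x ∈ HIGH_TRIGGERS <;>
  by_cases hW : ∃ x ∈ rs, x ∈ WARNING_TRIGGERS <;>
    simp [hC, hH, hW]
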